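-- pv_equiv track=rewrite | github.com/sudoneoox/CodePath-TIP-102 | Unit 3/Standard/Session_2/p5.py | merge_schedules
-- ===== SOURCE A (Python) =====
-- def merge_schedules(schedule_1, schedule_2):
--     stack = []
--     i, j = 0, 0
--     while i < len(schedule_1) and j < len(schedule_2):
--         stack.append(schedule_1[i])
--         stack.append(schedule_2[j])
--         i += 1
--         j += 1
--
--     while i < len(schedule_1):
--         stack.append(schedule_1[i])
--         i += 1
--
--     while j < len(schedule_2):
--         stack.append(schedule_2[j])
--         j += 1
--
--     return "".join(stack)
-- ===== SOURCE B (Python) =====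
-- def merge_schedules(schedule_1, schedule_2):
--     n = min(len(schedule_1), len(schedule_2))
--     prefix = [c for pair in zip(schedule_1, schedule_2) for c in pair]
--     tail = schedule_1[n:] if len(schedule_1) > len(schedule_2) else schedule_2[n:]
--     return "".join(prefix) + tail
-- ===== Notes on version B (the rewrite author's own statement) =====
-- stated objective: idiomatic
-- what changed: Replaces the three explicit index-driven while loops and per-element appends with a single flattened comprehension over zip plus one slice for the leftover tail.
import Mathlib
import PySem

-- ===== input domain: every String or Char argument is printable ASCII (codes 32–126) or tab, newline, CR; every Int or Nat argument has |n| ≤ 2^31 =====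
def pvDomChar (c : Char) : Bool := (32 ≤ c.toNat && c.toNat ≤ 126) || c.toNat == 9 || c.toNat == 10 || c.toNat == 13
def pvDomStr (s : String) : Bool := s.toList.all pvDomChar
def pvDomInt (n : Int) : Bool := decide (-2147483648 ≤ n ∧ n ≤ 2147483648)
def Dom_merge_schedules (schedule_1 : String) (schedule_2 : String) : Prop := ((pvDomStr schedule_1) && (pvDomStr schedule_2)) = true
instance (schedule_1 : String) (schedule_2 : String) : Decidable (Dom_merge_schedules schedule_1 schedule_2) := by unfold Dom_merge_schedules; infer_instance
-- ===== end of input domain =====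

-- B replaces A's three index-driven while loops with a zip comprehension plus a tail slice (idiomatic; return value only).


-- ===== PORT A =====
-- the three while loops of A, as structural recursion over the remaining characters:
-- first loop consumes both lists in step, the second/third loops copy the remainder
def mergeLoopA : List Char → List Char → List Char
  | x :: xs, y :: ys => x :: y :: mergeLoopA xs ys   -- while i < len1 and j < len2
  | xs, [] => xs                                     -- while i < len1
  | [], ys => ys                                     -- while j < len2

def merge_schedules (schedule_1 : String) (schedule_2 : String) : String :=
  String.ofList (mergeLoopA schedule_1.toList schedule_2.toList)

-- ===== PORT B =====
def merge_schedules_alt (schedule_1 : String) (schedule_2 : String) : String :=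
  let xs := schedule_1.toList
  let ys := schedule_2.toList
  let n := min xs.length ys.length
  let pre := (xs.zip ys).flatMap (fun p => [p.1, p.2])
  let tail := if xs.length > ys.length then xs.drop n else ys.drop n
  String.ofList (pre ++ tail)

-- ===== PRECONDITION & SPEC =====
def Spec_merge_schedules (schedule_1 : String) (schedule_2 : String) (out : String) : Prop := out = merge_schedules_alt schedule_1 schedule_2
instance (schedule_1 : String) (schedule_2 : String) (out : String) : Decidable (Spec_merge_schedules schedule_1 schedule_2 out) := by unfold Spec_merge_schedules; infer_instance

-- ===== CLAIM (what is proved, stated in full; the proofs are below) =====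
def Claim_equal_merge_schedules : Prop := ∀ (schedule_1 : String) (schedule_2 : String), Dom_merge_schedules schedule_1 schedule_2 → Spec_merge_schedules schedule_1 schedule_2 (merge_schedules schedule_1 schedule_2)

-- ===== LEMMAS AND PROOFS =====
theorem mergeLoopA_eq (xs ys : List Char) :
    mergeLoopA xs ys =
      (xs.zip ys).flatMap (fun p => [p.1, p.2]) ++
        (if xs.length > ys.length then xs.drop (min xs.length ys.length)
         else ys.drop (min xs.length ys.length)) := by
  induction xs generalizing ys with
  | nil =>
    cases ys <;> simp [mergeLoopA]
  | cons x xs ih =>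
    cases ys with
    | nil => simp [mergeLoopA]
    | cons y ys =>
      simp [mergeLoopA, ih ys]

-- ===== VERDICT (by name: the statement is the Claim_ definition above) =====
theorem merge_schedules_spec : Claim_equal_merge_schedules := by
  intro s1 s2 _
  unfold Spec_merge_schedules merge_schedules merge_schedules_alt
  simp [mergeLoopA_eq]
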